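-- pv_equiv track=rewrite | github.com/heartlocket/tgbots | 7.py | select_strings
-- ===== SOURCE A (Python) =====
-- def select_strings(array):
--     selected_strings = []
--     total_character_count = 0
--
--     # Start from the end of the original array
--     for string in reversed(array):
--         # Calculate the character count of the current string
--         string_length = len(string)
--
--         # Check if adding this string exceeds the character limit
--         if total_character_count + string_length <= 3500:
--             # Append the string to the selected_strings array
--             selected_strings.append(string)
--             total_character_count += string_length
--         else:
--             # If adding this string exceeds the limit, stop the loop
--             break
--
--     # Reverse the selected_strings array to get the correct order
--     selected_strings.reverse()
--
--     return selected_strings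
-- ===== SOURCE B (Python) =====
-- def select_strings(array):
--     # Staged passes: prefix sums of string lengths, then binary search for the
--     # smallest cut index whose suffix fits in the 3500-character budget.
--     sums = [0]
--     for s in array:
--         sums.append(sums[-1] + len(s))
--     total = sums[-1]
--     lo, hi = 0, len(array)
--     while lo < hi:
--         mid = (lo + hi) // 2
--         if total - sums[mid] <= 3500:
--             hi = mid
--         else:
--             lo = mid + 1
--     return list(array[lo:])
-- ===== Notes on version B (the rewrite author's own statement) =====
-- stated objective: alternative
-- what changed: Instead of a reverse greedy scan that appends strings and reverses, B builds a forward prefix-sum table of string lengths and binary-searches it for the smallest cut index whose suffix total fits in 3500 characters, returning one slice; correctness rests on suffix sums being monotone in the cut index since lengths are nonnegative.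
import Mathlib
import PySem

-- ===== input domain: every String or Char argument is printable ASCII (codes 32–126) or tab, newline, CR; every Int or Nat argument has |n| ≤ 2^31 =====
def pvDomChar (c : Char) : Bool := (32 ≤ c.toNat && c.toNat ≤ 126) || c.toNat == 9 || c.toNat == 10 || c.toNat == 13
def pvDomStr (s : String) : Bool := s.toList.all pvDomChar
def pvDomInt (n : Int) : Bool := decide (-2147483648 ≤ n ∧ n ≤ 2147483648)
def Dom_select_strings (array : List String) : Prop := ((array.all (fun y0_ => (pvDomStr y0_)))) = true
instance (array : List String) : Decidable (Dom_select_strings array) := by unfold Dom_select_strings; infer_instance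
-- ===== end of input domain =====

-- B replaces A's reverse greedy append-and-reverse scan by a forward prefix-sum table of
-- string lengths plus a binary search for the smallest cut index whose suffix fits the
-- 3500-character budget (alternative algorithm: correct because suffix sums are monotone).

-- ===== PORT A =====
def selAgo : List String → List String → Int → List String
  | [], selected, _ => selected
  | s :: rest, selected, total =>
    if total + PySem.Str.len s ≤ 3500 then
      selAgo rest (selected ++ [s]) (total + PySem.Str.len s)
    else selected

def select_strings (array : List String) : List String :=
  (selAgo array.reverse [] 0).reverse

-- ===== PORT B =====
-- sums[-1] is ported as pyGet? sums (-1); the accumulator always contains 0, so the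
-- .getD 0 default is never used.
def sumsB (array : List String) : List Int :=
  array.foldl (fun acc s => acc ++ [(PySem.List.pyGet? acc (-1)).getD 0 + PySem.Str.len s]) [0]

-- the while-loop of Source B; sums[mid] is always in range here, so .getD 0 is never used
def bsearchB (sums : List Int) (total : Int) (lo hi : Int) : Int :=
  if h : lo < hi then
    let mid := PySem.Int.floordiv (lo + hi) 2
    if total - (PySem.List.pyGet? sums mid).getD 0 ≤ 3500 then bsearchB sums total lo mid
    else bsearchB sums total (mid + 1) hi
  else lo
termination_by (hi - lo).toNat
decreasing_by
  · have hb := PySem.Int.floordiv_two_mid_bounds (le_of_lt h)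
    have hlt : PySem.Int.floordiv (lo + hi) 2 < hi := by
      rw [PySem.Int.floordiv_eq_ediv_of_pos (by omega : (0:Int) < 2)]
      omega
    simp only [mid] at *
    omega
  · have hb := PySem.Int.floordiv_two_mid_bounds (le_of_lt h)
    simp only [mid] at *
    omega

def select_strings_alt (array : List String) : List String :=
  let sums := sumsB array
  let total := (PySem.List.pyGet? sums (-1)).getD 0
  PySem.List.slice array (some (bsearchB sums total 0 (array.length : Int))) none

-- ===== PRECONDITION & SPEC =====
def Spec_select_strings (array : List String) (out : List String) : Prop := out = select_strings_alt array
instance (array : List String) (out : List String) : Decidable (Spec_select_strings array out) := by unfold Spec_select_strings; infer_instance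

-- ===== CLAIM (what is proved, stated in full; the proofs are below) =====
def Claim_equal_select_strings : Prop := ∀ (array : List String), Dom_select_strings array → Spec_select_strings array (select_strings array)

-- ===== LEMMAS AND PROOFS =====

-- the natural "kept prefix of the reversed list" describing A's loop
def goSel : List String → Int → List String
  | [], _ => []
  | s :: rest, total =>
    if total + PySem.Str.len s ≤ 3500 then s :: goSel rest (total + PySem.Str.len s)
    else []

theorem selAgo_eq (r : List String) : ∀ (acc : List String) (t : Int),
    selAgo r acc t = acc ++ goSel r t := by
  induction r with
  | nil => intro acc t; simp only [selAgo, goSel, List.append_nil]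
  | cons s rest ih =>
    intro acc t
    simp only [selAgo, goSel]
    split_ifs with h
    · rw [ih]; simp
    · simp

-- prefix sums and suffix sums of string lengths
def Spre (array : List String) (i : Nat) : Int := ((array.take i).map PySem.Str.len).sum
def Tsuf (array : List String) (i : Nat) : Int := ((array.drop i).map PySem.Str.len).sum

theorem len_nonneg (s : String) : 0 ≤ PySem.Str.len s := by
  simp [PySem.Str.len_eq]

theorem sum_len_nonneg (l : List String) : 0 ≤ (l.map PySem.Str.len).sum := by
  apply List.sum_nonneg; intro x hx
  simp only [List.mem_map] at hx
  obtain ⟨s, _, rfl⟩ := hx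
  exact len_nonneg s

theorem Tsuf_antitone (array : List String) (i j : Nat) (hij : i ≤ j) :
    Tsuf array j ≤ Tsuf array i := by
  unfold Tsuf
  have hj : (array.drop i).drop (j - i) = array.drop j := by
    rw [List.drop_drop]; congr 1; omega
  conv_rhs => rw [← List.take_append_drop (j - i) (array.drop i), hj]
  rw [List.map_append, List.sum_append]
  have h2 := sum_len_nonneg (((array.drop i).take (j - i)))
  omega

theorem Spre_add_Tsuf (array : List String) (i : Nat) :
    Spre array i + Tsuf array i = Spre array array.length := by
  unfold Spre Tsuf
  rw [List.take_of_length_le (le_refl _)]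
  conv_rhs => rw [← List.take_append_drop i array]
  rw [List.map_append, List.sum_append]

-- sumsB is the scanl of prefix sums
theorem sumsB_go (l : List String) : ∀ (acc : List Int) (x : Int),
    l.foldl (fun a s => a ++ [(PySem.List.pyGet? a (-1)).getD 0 + PySem.Str.len s]) (acc ++ [x])
      = acc ++ List.scanl (fun a s => a + PySem.Str.len s) x l := by
  induction l with
  | nil => intro acc x; simp [List.scanl_nil]
  | cons s rest ih =>
    intro acc x
    simp only [List.foldl_cons, List.scanl_cons]
    rw [PySem.List.pyGet?_neg_one_append_singleton]
    have h : acc ++ [x] ++ [(some x).getD 0 + PySem.Str.len s]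
        = (acc ++ [x]) ++ [x + PySem.Str.len s] := by simp
    rw [h, ih]
    simp

theorem sumsB_eq (array : List String) :
    sumsB array = List.scanl (fun a s => a + PySem.Str.len s) 0 array := by
  unfold sumsB
  have := sumsB_go array [] 0
  simpa using this

theorem scanl_getElem? (l : List String) : ∀ (i : Nat) (x : Int), i ≤ l.length →
    (List.scanl (fun a s => a + PySem.Str.len s) x l)[i]? = some (x + ((l.take i).map PySem.Str.len).sum) := by
  induction l with
  | nil =>
    intro i x h
    have hi0 : i = 0 := by simpa using h
    subst hi0
    simp [List.scanl_nil]
  | cons s rest ih =>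
    intro i x h
    cases i with
    | zero => simp [List.scanl_cons]
    | succ j =>
      simp only [List.scanl_cons, List.getElem?_cons_succ]
      rw [ih j (x + PySem.Str.len s) (by simpa using h)]
      simp [add_assoc]

theorem sums_getElem (array : List String) (i : Nat) (h : i ≤ array.length) :
    (sumsB array)[i]? = some (Spre array i) := by
  rw [sumsB_eq, scanl_getElem? array i 0 h]
  simp [Spre]

theorem sums_length (array : List String) : (sumsB array).length = array.length + 1 := by
  rw [sumsB_eq]; simp

theorem sums_total (array : List String) :
    (PySem.List.pyGet? (sumsB array) (-1)).getD 0 = Spre array array.length := by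
  rw [PySem.List.pyGet?_neg_one, List.getLast?_eq_getElem?, sums_length]
  simp only [Nat.add_sub_cancel]
  rw [sums_getElem array array.length (le_refl _)]
  rfl

-- binary search returns the unique boundary point
theorem bsearchB_eq (sums : List Int) (total : Int) (c : Int) :
    ∀ (fuel : Nat) (lo hi : Int), (hi - lo).toNat ≤ fuel → lo ≤ c → c ≤ hi →
    (∀ i, c ≤ i → i ≤ hi → total - (PySem.List.pyGet? sums i).getD 0 ≤ 3500) →
    (∀ i, lo ≤ i → i < c → ¬(total - (PySem.List.pyGet? sums i).getD 0 ≤ 3500)) →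
    bsearchB sums total lo hi = c := by
  intro fuel
  induction fuel with
  | zero =>
    intro lo hi hf h1 h2 _ _
    rw [bsearchB]
    have : ¬ lo < hi := by omega
    simp [this]
    omega
  | succ m ih =>
    intro lo hi hf h1 h2 habove hbelow
    rw [bsearchB]
    by_cases hlt : lo < hi
    · simp only [hlt, dif_pos]
      have hb := PySem.Int.floordiv_two_mid_bounds (le_of_lt hlt)
      have hmidlt : PySem.Int.floordiv (lo + hi) 2 < hi := by
        rw [PySem.Int.floordiv_eq_ediv_of_pos (by omega : (0:Int) < 2)]
        omega
      set mid := PySem.Int.floordiv (lo + hi) 2 with hmid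
      by_cases ht : total - (PySem.List.pyGet? sums mid).getD 0 ≤ 3500
      · simp only [ht, if_pos]
        have hcm : c ≤ mid := by
          by_contra hc
          exact hbelow mid hb.1 (by omega) ht
        exact ih lo mid (by omega) h1 hcm
          (fun i hi1 hi2 => habove i hi1 (by omega))
          hbelow
      · simp only [ht, if_neg, not_false_iff]
        have hcm : mid < c := by
          by_contra hc
          exact ht (habove mid (by omega) (le_of_lt hmidlt))
        exact ih (mid + 1) hi (by omega) (by omega) h2 habove
          (fun i hi1 hi2 => hbelow i (by omega) hi2)
    · simp only [hlt, dif_neg, not_false_iff]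
      omega

-- A's loop: the kept strings always fit the budget …
theorem goSel_fits (r : List String) : ∀ (t : Int), t ≤ 3500 →
    t + ((r.take (goSel r t).length).map PySem.Str.len).sum ≤ 3500 := by
  induction r with
  | nil => intro t ht; simpa [goSel]
  | cons s rest ih =>
    intro t ht
    simp only [goSel]
    split_ifs with h
    · simp only [List.length_cons, List.take_succ_cons, List.map_cons, List.sum_cons]
      have := ih (t + PySem.Str.len s) h
      omega
    · simpa
-- … and the loop stops only at the end or at an overflowing string
theorem goSel_maximal (r : List String) : ∀ (t : Int),
    (goSel r t).length = r.length ∨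
    t + ((r.take ((goSel r t).length + 1)).map PySem.Str.len).sum > 3500 := by
  induction r with
  | nil => intro t; left; simp [goSel]
  | cons s rest ih =>
    intro t
    simp only [goSel]
    split_ifs with h
    · rcases ih (t + PySem.Str.len s) with hlen | hgt
      · left
        simp at hlen ⊢
        omega
      · right
        simp only [List.length_cons, List.take_succ_cons, List.map_cons, List.sum_cons]
        omega
    · right
      simp at h ⊢
      omega

theorem goSel_take (r : List String) : ∀ (t : Int),
    goSel r t = r.take (goSel r t).length := by
  induction r with
  | nil => intro t; simp [goSel]
  | cons s rest ih =>
    intro t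
    simp only [goSel]
    split_ifs with h
    · rw [List.length_cons, List.take_succ_cons]
      congr 1
      exact ih _
    · simp

theorem goSel_len_le (r : List String) (t : Int) : (goSel r t).length ≤ r.length := by
  conv_lhs => rw [goSel_take r t]
  simp

-- reversed-prefix sums are suffix sums
theorem rev_take_sum (array : List String) (k : Nat) (_hk : k ≤ array.length) :
    ((array.reverse.take k).map PySem.Str.len).sum = Tsuf array (array.length - k) := by
  unfold Tsuf
  rw [List.take_reverse]
  simp

theorem select_strings_spec : Claim_equal_select_strings := by
  intro array _
  unfold Spec_select_strings select_strings select_strings_alt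
  rw [selAgo_eq]
  set n := array.length with hn
  set k := (goSel array.reverse 0).length with hk
  have hkle : k ≤ n := by
    have := goSel_len_le array.reverse 0
    simpa [hn] using this
  set c : Nat := n - k with hc
  -- characterise the cut
  have hfit : Tsuf array c ≤ 3500 := by
    have h1 := goSel_fits array.reverse 0 (by norm_num)
    rw [← hk, rev_take_sum array k hkle] at h1
    simpa [hc] using h1
  have hstop : ∀ i : Nat, i < c → ¬ (Tsuf array i ≤ 3500) := by
    intro i hi hTi
    have hkn : k < n := by omega
    rcases goSel_maximal array.reverse 0 with hlen | hgt
    · rw [← hk] at hlen; simp at hlen; omega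
    · rw [← hk, rev_take_sum array (k + 1) (by omega)] at hgt
      have hcc : n - (k + 1) = c - 1 := by omega
      rw [hcc] at hgt
      have := Tsuf_antitone array i (c - 1) (by omega)
      omega
  -- the binary search lands exactly on c
  have htot := sums_total array
  have hget : ∀ i : Int, 0 ≤ i → i ≤ (n : Int) →
      (PySem.List.pyGet? (sumsB array) i).getD 0 = Spre array i.toNat := by
    intro i h0 hle
    rw [PySem.List.pyGet?_of_nonneg (sumsB array) h0, sums_getElem array i.toNat (by omega)]
    rfl
  have hbs : bsearchB (sumsB array) ((PySem.List.pyGet? (sumsB array) (-1)).getD 0) 0 (n : Int) = (c : Int) := by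
    apply bsearchB_eq _ _ _ ((n : Int) - 0).toNat 0 (n : Int) (le_refl _) (by omega) (by omega)
    · intro i hci hin
      rw [htot, hget i (by omega) hin]
      have hst := Spre_add_Tsuf array i.toNat
      have hmon := Tsuf_antitone array c i.toNat (by omega)
      omega
    · intro i h0 hic
      rw [htot, hget i h0 (by omega)]
      have hst := Spre_add_Tsuf array i.toNat
      have hns := hstop i.toNat (by omega)
      omega
  rw [List.nil_append]
  show (goSel array.reverse 0).reverse
      = PySem.List.slice array (some (bsearchB (sumsB array)
          ((PySem.List.pyGet? (sumsB array) (-1)).getD 0) 0 (n : Int))) none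
  rw [hbs, PySem.List.slice_from_natCast]
  conv_lhs => rw [goSel_take array.reverse 0, ← hk]
  rw [List.take_reverse]
  simp [hc, hn]
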